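-- pv_equiv track=rewrite | github.com/benhirsch24/benhirsch24.github.com | site_builder.py | group_posts_by_year
-- ===== SOURCE A (Python) =====
-- def group_posts_by_year(posts):
--     """Group posts by year for the archive page"""
--     years = {}
--     for post in posts:
--         # Extract year from date string
--         if isinstance(post['date'], str) and len(post['date']) >= 4:
--             year = post['date'][:4]
--         else:
--             year = "Unknown"
--
--         if year not in years:
--             years[year] = []
--         years[year].append(post)
--
--     # Sort years in descending order
--     return dict(sorted(years.items(), key=lambda x: x[0], reverse=True))
-- ===== SOURCE B (Python) =====
-- def group_posts_by_year(posts):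
--     """Group posts by year for the archive page"""
--     def year_of(post):
--         d = post['date']
--         return d[:4] if isinstance(d, str) and len(d) >= 4 else "Unknown"
--     years = sorted({year_of(p) for p in posts}, reverse=True)
--     return {y: [p for p in posts if year_of(p) == y] for y in years}
-- ===== Notes on version B (the rewrite author's own statement) =====
-- stated objective: alternative
-- what changed: B reverses A's phases: it sorts the distinct year keys (set + sorted reverse) first and then builds each year's list by filtering the posts, instead of A's one-pass dict accumulation followed by sorting the dict items.
import Mathlib
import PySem

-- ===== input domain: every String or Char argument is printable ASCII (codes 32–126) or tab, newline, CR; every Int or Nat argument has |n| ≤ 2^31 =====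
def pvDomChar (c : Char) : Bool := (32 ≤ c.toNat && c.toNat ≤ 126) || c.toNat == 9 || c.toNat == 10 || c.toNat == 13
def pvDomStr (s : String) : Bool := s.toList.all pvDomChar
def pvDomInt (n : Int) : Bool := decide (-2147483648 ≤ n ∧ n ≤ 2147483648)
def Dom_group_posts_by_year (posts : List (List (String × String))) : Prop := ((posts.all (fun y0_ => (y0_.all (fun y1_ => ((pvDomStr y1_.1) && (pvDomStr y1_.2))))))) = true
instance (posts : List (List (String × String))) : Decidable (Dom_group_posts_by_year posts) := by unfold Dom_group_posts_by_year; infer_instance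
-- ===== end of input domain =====

-- B sorts the distinct year keys first and then filters the posts per year, instead of
-- A's dict accumulation followed by sorting the items.  Equivalence of the return value is proved.

-- ===== PORT A =====
-- One loop building a dict year -> list of posts, then dict(sorted(items, key=fst, reverse=True)).
def group_posts_by_year (posts : List (List (String × String))) : List (String × List (List (String × String))) :=
  let years := posts.foldl (fun years post =>
      -- post['date']: Pre_ excludes posts without a "date" key (KeyError);
      -- isinstance(post['date'], str) is always true under the type convention
      let date := PySem.Dict.getD (PySem.Dict.mk post) "date" ""
      let year := if 4 ≤ PySem.Str.len date then PySem.Str.slice date none (some 4) else "Unknown"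
      let years := if years.contains year then years else years.insert year []
      years.insert year (years.getD year [] ++ [post]))
    PySem.Dict.empty
  (PySem.Dict.ofList (PySem.List.sorted years.items (fun x => x.1) true)).items

-- ===== PORT B =====
def pvYearOf (post : List (String × String)) : String :=
  -- post['date']; Pre_ excludes the KeyError case
  let d := PySem.Dict.getD (PySem.Dict.mk post) "date" ""
  if 4 ≤ PySem.Str.len d then PySem.Str.slice d none (some 4) else "Unknown"

def group_posts_by_year_alt (posts : List (List (String × String))) : List (String × List (List (String × String))) :=
  let years := PySem.List.sorted (PySem.Set.ofList (posts.map pvYearOf)) (fun y => y) true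
  (years.foldl (fun d y => d.insert y (posts.filter (fun p => pvYearOf p == y))) PySem.Dict.empty).items

-- ===== PRECONDITION & SPEC =====
-- Pre_ excludes exactly the posts without a "date" key, on which the Python A raises KeyError.
def Pre_group_posts_by_year (posts : List (List (String × String))) : Prop :=
  ∀ p ∈ posts, "date" ∈ p.map Prod.fst
instance (posts : List (List (String × String))) : Decidable (Pre_group_posts_by_year posts) := by unfold Pre_group_posts_by_year; infer_instance
def pvWitness_group_posts_by_year : (List (List (String × String))) :=
  [[("date", "2024-01-01"), ("title", "a")], [("date", "2023-05-02"), ("title", "b")]]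

def Spec_group_posts_by_year (posts : List (List (String × String))) (out : List (String × List (List (String × String)))) : Prop := out = group_posts_by_year_alt posts
instance (posts : List (List (String × String))) (out : List (String × List (List (String × String)))) : Decidable (Spec_group_posts_by_year posts out) := by unfold Spec_group_posts_by_year; infer_instance

-- ===== CLAIM (what is proved, stated in full; the proofs are below) =====
def Claim_equal_group_posts_by_year : Prop := ∀ (posts : List (List (String × String))), Dom_group_posts_by_year posts → Pre_group_posts_by_year posts → Spec_group_posts_by_year posts (group_posts_by_year posts)

-- ===== LEMMAS AND PROOFS =====

theorem pv_items_empty {κ ν : Type} : (PySem.Dict.empty : PySem.Dict κ ν).items = [] := rfl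

-- the canonical form both ports are reduced to
def pvCanon (posts : List (List (String × String))) : List (String × List (List (String × String))) :=
  (PySem.List.sorted (PySem.Set.ofList (posts.map pvYearOf)) (fun y => y) true).map
    (fun c => (c, posts.filter (fun p => pvYearOf p == c)))

theorem pv_sorted_rev_nodup_gt (S : List String) (h : S.Nodup) :
    (PySem.List.sorted S (fun y => y) true).Pairwise (fun a b => b < a) := by
  have hle := PySem.List.sorted_pairwise_rev S (fun y => y)
  have hnd : (PySem.List.sorted S (fun y => y) true).Nodup :=
    ((PySem.List.sorted_perm S (fun y => y) true).nodup_iff).mpr h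
  exact (hle.and hnd).imp (fun h => lt_of_le_of_ne h.1 (fun he => h.2 he.symm))

-- sorting a keyed map of a nodup key list = mapping the sorted key list
theorem pv_sorted_map (S : List String) (h : S.Nodup)
    (g : String → (String × List (List (String × String)))) (hg : ∀ c, (g c).1 = c) :
    PySem.List.sorted (S.map g) (fun x => x.1) true
      = (PySem.List.sorted S (fun y => y) true).map g := by
  apply PySem.List.sorted_rev_eq_of_perm_of_pairwise_gt
  · exact (PySem.List.sorted_perm S (fun y => y) true).map g
  · rw [List.pairwise_map]
    exact (pv_sorted_rev_nodup_gt S h).imp (fun {a b} hlt => by simpa [hg] using hlt)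

-- dict-of-pairs with distinct keys is the pair list itself
theorem pv_items_ofList (ps : List (String × List (List (String × String))))
    (h : (ps.map Prod.fst).Nodup) : (PySem.Dict.ofList ps).items = ps := by
  have := PySem.Dict.items_foldl_insert_fresh ps Prod.fst Prod.snd PySem.Dict.empty
    (fun a _ => by simp [PySem.Dict.contains_empty]) h
  simpa [PySem.Dict.ofList, PySem.Dict.update, pv_items_empty] using this

-- A's loop step is exactly a Dict.modify
theorem pv_stepA (d : PySem.Dict String (List (List (String × String)))) (post : List (String × String)) :
    (let year := pvYearOf post
     let d' := if d.contains year then d else d.insert year []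
     d'.insert year (d'.getD year [] ++ [post]))
      = d.modify (pvYearOf post) [] (fun l => l ++ [post]) := by
  by_cases h : d.contains (pvYearOf post)
  · simp [h, PySem.Dict.modify]
  · simp [h, PySem.Dict.modify, PySem.Dict.insert_insert_self, PySem.Dict.getD_insert_self,
      PySem.Dict.getD_of_not_contains d [] (Bool.of_not_eq_true h)]

theorem pv_A_eq (posts : List (List (String × String))) :
    group_posts_by_year posts = pvCanon posts := by
  unfold group_posts_by_year
  have hstep : (fun (years : PySem.Dict String (List (List (String × String)))) post =>
      let date := PySem.Dict.getD (PySem.Dict.mk post) "date" ""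
      let year := if 4 ≤ PySem.Str.len date then PySem.Str.slice date none (some 4) else "Unknown"
      let years' := if years.contains year then years else years.insert year []
      years'.insert year (years'.getD year [] ++ [post]))
      = (fun d post => d.modify (pvYearOf post) [] (fun l => l ++ [post])) := by
    funext d post
    exact pv_stepA d post
  rw [hstep]
  set F := fun (d : PySem.Dict String (List (List (String × String)))) post =>
    d.modify (pvYearOf post) [] (fun l => l ++ [post]) with hF
  have hkeys : (posts.foldl F PySem.Dict.empty).keys = PySem.Set.ofList (posts.map pvYearOf) := by
    rw [hF]
    have := PySem.Dict.keys_foldl_modify_key posts pvYearOf []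
      (fun _ post => (fun l => l ++ [post])) PySem.Dict.empty
    simpa [PySem.Dict.keys_empty, PySem.Set.ofList, PySem.Set.update] using this
  have hnd : (posts.foldl F PySem.Dict.empty).keys.Nodup := by
    rw [hF]
    exact PySem.Dict.nodup_keys_foldl_modify_key posts pvYearOf []
      (fun _ post => (fun l => l ++ [post])) PySem.Dict.empty PySem.Dict.nodup_keys_empty
  have hgetD : ∀ c, (posts.foldl F PySem.Dict.empty).getD c []
      = posts.filter (fun p => pvYearOf p == c) := by
    intro c
    have hmap : posts.foldl F PySem.Dict.empty
        = (posts.map (fun p => (pvYearOf p, p))).foldl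
            (fun d q => d.modify q.1 [] (fun l => l ++ [q.2])) PySem.Dict.empty := by
      rw [List.foldl_map]
    rw [hmap, PySem.Dict.getD_foldl_modify_append]
    simp [List.filter_map, Function.comp_def]
  have hitems : (posts.foldl F PySem.Dict.empty).items
      = (PySem.Set.ofList (posts.map pvYearOf)).map
          (fun c => (c, posts.filter (fun p => pvYearOf p == c))) := by
    rw [PySem.Dict.items_eq_map_keys _ hnd [], hkeys]
    exact List.map_congr_left (fun c _ => by rw [hgetD c])
  show (PySem.Dict.ofList (PySem.List.sorted (posts.foldl F PySem.Dict.empty).items (fun x => x.1) true)).items = pvCanon posts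
  rw [hitems]
  have hsorted := pv_sorted_map (PySem.Set.ofList (posts.map pvYearOf))
    (PySem.Set.nodup_ofList _)
    (fun c => (c, posts.filter (fun p => pvYearOf p == c))) (fun c => rfl)
  rw [hsorted, pvCanon]
  apply pv_items_ofList
  rw [List.map_map]
  have : (Prod.fst ∘ fun c => (c, posts.filter (fun p => pvYearOf p == c))) = id := by
    funext c; rfl
  rw [this, List.map_id]
  exact ((PySem.List.sorted_perm _ _ true).nodup_iff).mpr (PySem.Set.nodup_ofList _)

theorem pv_B_eq (posts : List (List (String × String))) :
    group_posts_by_year_alt posts = pvCanon posts := by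
  unfold group_posts_by_year_alt pvCanon
  have hnd : (PySem.List.sorted (PySem.Set.ofList (posts.map pvYearOf)) (fun y => y) true).Nodup :=
    ((PySem.List.sorted_perm _ _ true).nodup_iff).mpr (PySem.Set.nodup_ofList _)
  have := PySem.Dict.items_foldl_insert_fresh
    (PySem.List.sorted (PySem.Set.ofList (posts.map pvYearOf)) (fun y => y) true)
    (fun y => y) (fun y => posts.filter (fun p => pvYearOf p == y)) PySem.Dict.empty
    (fun a _ => by simp [PySem.Dict.contains_empty]) (by simpa using hnd)
  simpa [pv_items_empty] using this

-- ===== VERDICT (by name: the statement is the Claim_ definition above) =====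
theorem group_posts_by_year_spec : Claim_equal_group_posts_by_year := by
  intro posts _ _
  unfold Spec_group_posts_by_year
  rw [pv_A_eq posts, pv_B_eq posts]
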